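-- pv_equiv track=rewrite | github.com/Yrviocnhnie/Bandit_SFM | recommendation_agents/recommendation_agents/linucb.py | _infer_scene_affinities
-- ===== SOURCE A (Python) =====
-- def _infer_scene_affinities(action_id: str, tokens: list[str]) -> tuple[str, ...]:
--     token_set = set(tokens)
--     affinities: list[str] = []
--
--     def add(name: str) -> None:
--         if name not in affinities:
--             affinities.append(name)
--
--     if {"work", "office", "calendar", "schedule", "todo", "meeting", "offsite"} & token_set:
--         add("work")
--     if {"home", "sleep", "relax", "curtains", "light", "charge"} & token_set:
--         add("home")
--     if {"commute", "traffic"} & token_set: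
--         add("commute")
--     if {"travel", "trip", "booking", "drive", "depart", "pickup"} & token_set:
--         add("travel")
--     if {"meeting", "calendar"} & token_set:
--         add("meeting")
--     if {"outdoor", "weather", "walking", "nearby", "route", "hydrate"} & token_set:
--         add("outdoor")
--     if {"activity", "tracking", "workout", "recovery", "walk"} & token_set:
--         add("exercise")
--     if {"meal", "coffee", "payment", "qr"} & token_set:
--         add("meal_break")
--     if {"sleep", "dnd", "silent", "comfort", "light"} & token_set:
--         add("night_quiet")
--     if {"payment", "nearby", "booking", "pickup", "frequent", "social"} & token_set:
--         add("social_errand")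
--
--     if len(tokens) == 1 and action_id.islower():
--         app_affinity_map = {
--             "productivity": ("work",),
--             "navigation": ("commute", "travel"),
--             "health": ("exercise", "outdoor"),
--             "music": ("commute", "exercise", "home"),
--             "shopping": ("social_errand",),
--             "social": ("social_errand",),
--             "reading": ("home", "night_quiet", "work"),
--             "news": ("commute", "work"),
--             "entertainment": ("home", "social_errand"),
--             "game": ("home",),
--         }
--         for affinity in app_affinity_map.get(action_id, ()):
--             add(affinity)
--
--     if not affinities:
--         add("work" if action_id.startswith("O_SHOW_") else "home")
--     return tuple(affinities)
-- ===== SOURCE B (Python) =====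
-- _CANONICAL = ("work", "home", "commute", "travel", "meeting", "outdoor",
--               "exercise", "meal_break", "night_quiet", "social_errand")
--
-- # reverse index: trigger token -> scene tags it activates
-- _TRIGGERS = {
--     "work": ("work",), "office": ("work",), "calendar": ("work", "meeting"),
--     "schedule": ("work",), "todo": ("work",), "meeting": ("work", "meeting"),
--     "offsite": ("work",),
--     "home": ("home",), "sleep": ("home", "night_quiet"), "relax": ("home",),
--     "curtains": ("home",), "light": ("home", "night_quiet"), "charge": ("home",),
--     "commute": ("commute",), "traffic": ("commute",),
--     "travel": ("travel",), "trip": ("travel",),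
--     "booking": ("travel", "social_errand"), "drive": ("travel",),
--     "depart": ("travel",), "pickup": ("travel", "social_errand"),
--     "outdoor": ("outdoor",), "weather": ("outdoor",), "walking": ("outdoor",),
--     "nearby": ("outdoor", "social_errand"), "route": ("outdoor",),
--     "hydrate": ("outdoor",),
--     "activity": ("exercise",), "tracking": ("exercise",), "workout": ("exercise",),
--     "recovery": ("exercise",), "walk": ("exercise",),
--     "meal": ("meal_break",), "coffee": ("meal_break",),
--     "payment": ("meal_break", "social_errand"), "qr": ("meal_break",),
--     "dnd": ("night_quiet",), "silent": ("night_quiet",), "comfort": ("night_quiet",),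
--     "frequent": ("social_errand",), "social": ("social_errand",),
-- }
--
-- _APP_AFFINITY_MAP = {
--     "productivity": ("work",),
--     "navigation": ("commute", "travel"),
--     "health": ("exercise", "outdoor"),
--     "music": ("commute", "exercise", "home"),
--     "shopping": ("social_errand",),
--     "social": ("social_errand",),
--     "reading": ("home", "night_quiet", "work"),
--     "news": ("commute", "work"),
--     "entertainment": ("home", "social_errand"),
--     "game": ("home",),
-- }
--
--
-- def _infer_scene_affinities(action_id: str, tokens: list[str]) -> tuple[str, ...]:
--     hit = set()
--     for t in tokens:
--         hit.update(_TRIGGERS.get(t, ()))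
--     affinities = [tag for tag in _CANONICAL if tag in hit]
--
--     if len(tokens) == 1 and action_id.islower():
--         for affinity in _APP_AFFINITY_MAP.get(action_id, ()):
--             if affinity not in affinities:
--                 affinities.append(affinity)
--
--     if not affinities:
--         affinities.append("work" if action_id.startswith("O_SHOW_") else "home")
--     return tuple(affinities)
-- ===== Notes on version B (the rewrite author's own statement) =====
-- stated objective: alternative
-- what changed: Replaces A's ten hand-written trigger-set intersections against the token set by a single precomputed reverse index (token -> scene tags) folded once over the tokens, then emits the hit tags by walking the fixed canonical scene order; the app-affinity lookup and O_SHOW_ fallback are kept.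
import Mathlib
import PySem

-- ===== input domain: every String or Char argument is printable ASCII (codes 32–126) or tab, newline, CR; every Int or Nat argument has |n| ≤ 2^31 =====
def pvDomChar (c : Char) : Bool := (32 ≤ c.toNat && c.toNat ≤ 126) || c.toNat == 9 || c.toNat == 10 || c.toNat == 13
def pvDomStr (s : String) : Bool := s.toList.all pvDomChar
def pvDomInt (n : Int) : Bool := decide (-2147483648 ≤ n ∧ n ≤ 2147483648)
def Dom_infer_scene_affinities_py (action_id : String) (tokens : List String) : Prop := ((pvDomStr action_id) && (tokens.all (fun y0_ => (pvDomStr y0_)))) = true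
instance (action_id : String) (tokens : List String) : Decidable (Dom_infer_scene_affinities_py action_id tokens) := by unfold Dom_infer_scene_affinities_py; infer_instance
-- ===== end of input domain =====

set_option maxRecDepth 8000
set_option maxRecDepth 8000
set_option maxRecDepth 8000

-- B replaces A's ten hand-written trigger-set intersections by a precomputed reverse index
-- (token -> list of scene tags) folded over the tokens, then emits the hit tags in the fixed
-- canonical scene order (objective: alternative data structure; same return value, proved equal).

-- ===== PORT A =====

-- the inner `add` closure of A: `if name not in affinities: affinities.append(name)`
def pyAdd (affinities : List String) (name : String) : List String :=
  if affinities.contains name then affinities else affinities ++ [name]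

-- Python str.islower(): at least one cased character, none of them uppercase (exact on ASCII).
def pyIslower (s : String) : Bool :=
  s.toList.any PySem.Chars.islower && !(s.toList.any PySem.Chars.isupper)

-- `{...literals...} & token_set` used as a truth value: the intersection is nonempty.
def pyInterNonempty (lits : List String) (token_set : PySem.Set String) : Bool :=
  !(PySem.Set.inter (PySem.Set.ofList lits) token_set).isEmpty

def appMapA : PySem.Dict String (List String) := PySem.Dict.mk
  [("productivity", ["work"]),
   ("navigation", ["commute", "travel"]),
   ("health", ["exercise", "outdoor"]),
   ("music", ["commute", "exercise", "home"]),
   ("shopping", ["social_errand"]),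
   ("social", ["social_errand"]),
   ("reading", ["home", "night_quiet", "work"]),
   ("news", ["commute", "work"]),
   ("entertainment", ["home", "social_errand"]),
   ("game", ["home"])]

def infer_scene_affinities_py (action_id : String) (tokens : List String) : List String :=
  let token_set := PySem.Set.ofList tokens
  let affinities : List String := []
  let affinities := if pyInterNonempty ["work", "office", "calendar", "schedule", "todo", "meeting", "offsite"] token_set then pyAdd affinities "work" else affinities
  let affinities := if pyInterNonempty ["home", "sleep", "relax", "curtains", "light", "charge"] token_set then pyAdd affinities "home" else affinities
  let affinities := if pyInterNonempty ["commute", "traffic"] token_set then pyAdd affinities "commute" else affinities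
  let affinities := if pyInterNonempty ["travel", "trip", "booking", "drive", "depart", "pickup"] token_set then pyAdd affinities "travel" else affinities
  let affinities := if pyInterNonempty ["meeting", "calendar"] token_set then pyAdd affinities "meeting" else affinities
  let affinities := if pyInterNonempty ["outdoor", "weather", "walking", "nearby", "route", "hydrate"] token_set then pyAdd affinities "outdoor" else affinities
  let affinities := if pyInterNonempty ["activity", "tracking", "workout", "recovery", "walk"] token_set then pyAdd affinities "exercise" else affinities
  let affinities := if pyInterNonempty ["meal", "coffee", "payment", "qr"] token_set then pyAdd affinities "meal_break" else affinities
  let affinities := if pyInterNonempty ["sleep", "dnd", "silent", "comfort", "light"] token_set then pyAdd affinities "night_quiet" else affinities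
  let affinities := if pyInterNonempty ["payment", "nearby", "booking", "pickup", "frequent", "social"] token_set then pyAdd affinities "social_errand" else affinities
  let affinities := if tokens.length == 1 && pyIslower action_id then
      (PySem.Dict.getD appMapA action_id []).foldl pyAdd affinities
    else affinities
  if affinities.isEmpty then
    pyAdd affinities (if PySem.Str.startswith action_id "O_SHOW_" then "work" else "home")
  else affinities

-- ===== PORT B =====

def canonicalB : List String := 
  ["work", "home", "commute", "travel", "meeting", "outdoor", "exercise", "meal_break", "night_quiet", "social_errand"]

def triggersB : PySem.Dict String (List String) := PySem.Dict.mk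
  [("work", ["work"]),
   ("office", ["work"]),
   ("calendar", ["work", "meeting"]),
   ("schedule", ["work"]),
   ("todo", ["work"]),
   ("meeting", ["work", "meeting"]),
   ("offsite", ["work"]),
   ("home", ["home"]),
   ("sleep", ["home", "night_quiet"]),
   ("relax", ["home"]),
   ("curtains", ["home"]),
   ("light", ["home", "night_quiet"]),
   ("charge", ["home"]),
   ("commute", ["commute"]),
   ("traffic", ["commute"]),
   ("travel", ["travel"]),
   ("trip", ["travel"]),
   ("booking", ["travel", "social_errand"]),
   ("drive", ["travel"]),
   ("depart", ["travel"]),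
   ("pickup", ["travel", "social_errand"]),
   ("outdoor", ["outdoor"]),
   ("weather", ["outdoor"]),
   ("walking", ["outdoor"]),
   ("nearby", ["outdoor", "social_errand"]),
   ("route", ["outdoor"]),
   ("hydrate", ["outdoor"]),
   ("activity", ["exercise"]),
   ("tracking", ["exercise"]),
   ("workout", ["exercise"]),
   ("recovery", ["exercise"]),
   ("walk", ["exercise"]),
   ("meal", ["meal_break"]),
   ("coffee", ["meal_break"]),
   ("payment", ["meal_break", "social_errand"]),
   ("qr", ["meal_break"]),
   ("dnd", ["night_quiet"]),
   ("silent", ["night_quiet"]),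
   ("comfort", ["night_quiet"]),
   ("frequent", ["social_errand"]),
   ("social", ["social_errand"])]

def appMapB : PySem.Dict String (List String) := PySem.Dict.mk
  [("productivity", ["work"]),
   ("navigation", ["commute", "travel"]),
   ("health", ["exercise", "outdoor"]),
   ("music", ["commute", "exercise", "home"]),
   ("shopping", ["social_errand"]),
   ("social", ["social_errand"]),
   ("reading", ["home", "night_quiet", "work"]),
   ("news", ["commute", "work"]),
   ("entertainment", ["home", "social_errand"]),
   ("game", ["home"])]

def infer_scene_affinities_py_alt (action_id : String) (tokens : List String) : List String :=
  let hit : PySem.Set String :=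
    tokens.foldl (fun h t => PySem.Set.update h (PySem.Dict.getD triggersB t [])) PySem.Set.empty
  let affinities := canonicalB.filter (fun tag => PySem.Set.contains hit tag)
  let affinities := if tokens.length == 1 && pyIslower action_id then
      (PySem.Dict.getD appMapB action_id []).foldl
        (fun acc a => if acc.contains a then acc else acc ++ [a]) affinities
    else affinities
  if affinities.isEmpty then
    affinities ++ [if PySem.Str.startswith action_id "O_SHOW_" then "work" else "home"]
  else affinities

-- ===== PRECONDITION & SPEC =====
def Spec_infer_scene_affinities_py (action_id : String) (tokens : List String) (out : List String) : Prop := out = infer_scene_affinities_py_alt action_id tokens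
instance (action_id : String) (tokens : List String) (out : List String) : Decidable (Spec_infer_scene_affinities_py action_id tokens out) := by unfold Spec_infer_scene_affinities_py; infer_instance

-- ===== CLAIM (what is proved, stated in full; the proofs are below) =====
def Claim_equal_infer_scene_affinities_py : Prop := ∀ (action_id : String) (tokens : List String), Dom_infer_scene_affinities_py action_id tokens → Spec_infer_scene_affinities_py action_id tokens (infer_scene_affinities_py action_id tokens)

-- ===== LEMMAS AND PROOFS =====

-- A's trigger word lists, indexed by the scene tag (proof-layer restatement of A's literals).
def litsOf (tag : String) : List String :=
  if tag == "work" then ["work", "office", "calendar", "schedule", "todo", "meeting", "offsite"] else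
  if tag == "home" then ["home", "sleep", "relax", "curtains", "light", "charge"] else
  if tag == "commute" then ["commute", "traffic"] else
  if tag == "travel" then ["travel", "trip", "booking", "drive", "depart", "pickup"] else
  if tag == "meeting" then ["meeting", "calendar"] else
  if tag == "outdoor" then ["outdoor", "weather", "walking", "nearby", "route", "hydrate"] else
  if tag == "exercise" then ["activity", "tracking", "workout", "recovery", "walk"] else
  if tag == "meal_break" then ["meal", "coffee", "payment", "qr"] else
  if tag == "night_quiet" then ["sleep", "dnd", "silent", "comfort", "light"] else
  if tag == "social_errand" then ["payment", "nearby", "booking", "pickup", "frequent", "social"] else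
  []

-- A's if-chain with its ten conditions abstracted into q (defeq to A's chain at q = A's tests).
def stageQ (q : String → Bool) : List String :=
  let a : List String := []
  let a := if q "work" then pyAdd a "work" else a
  let a := if q "home" then pyAdd a "home" else a
  let a := if q "commute" then pyAdd a "commute" else a
  let a := if q "travel" then pyAdd a "travel" else a
  let a := if q "meeting" then pyAdd a "meeting" else a
  let a := if q "outdoor" then pyAdd a "outdoor" else a
  let a := if q "exercise" then pyAdd a "exercise" else a
  let a := if q "meal_break" then pyAdd a "meal_break" else a
  let a := if q "night_quiet" then pyAdd a "night_quiet" else a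
  let a := if q "social_errand" then pyAdd a "social_errand" else a
  a

-- the common tail (app-affinity block + fallback), A's wording.
def tailA (action_id : String) (tokens : List String) (affinities : List String) : List String :=
  let affinities := if tokens.length == 1 && pyIslower action_id then
      (PySem.Dict.getD appMapA action_id []).foldl pyAdd affinities
    else affinities
  if affinities.isEmpty then
    pyAdd affinities (if PySem.Str.startswith action_id "O_SHOW_" then "work" else "home")
  else affinities

-- the common tail, B's wording.
def tailB (action_id : String) (tokens : List String) (affinities : List String) : List String :=
  let affinities := if tokens.length == 1 && pyIslower action_id then
      (PySem.Dict.getD appMapB action_id []).foldl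
        (fun acc a => if acc.contains a then acc else acc ++ [a]) affinities
    else affinities
  if affinities.isEmpty then
    affinities ++ [if PySem.Str.startswith action_id "O_SHOW_" then "work" else "home"]
  else affinities

theorem mem_getD_iff (d : PySem.Dict String (List String)) (hnd : d.keys.Nodup) (u tag : String) :
    tag ∈ d.getD u [] ↔ ∃ v, (u, v) ∈ d.items ∧ tag ∈ v := by
  rw [PySem.Dict.getD]
  cases hg : d.get? u with
  | none =>
    simp only [Option.getD_none, List.not_mem_nil, false_iff]
    rintro ⟨v, hv, -⟩
    have := PySem.Dict.get?_of_mem_items (d := d) hv hnd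
    rw [hg] at this; cases this
  | some v =>
    simp only [Option.getD_some]
    constructor
    · intro hm; exact ⟨v, PySem.Dict.mem_items_of_get?_eq_some (d := d) hg, hm⟩
    · rintro ⟨w, hw, hm⟩
      have := PySem.Dict.get?_of_mem_items (d := d) hw hnd
      rw [hg] at this; cases this; exact hm

theorem nodup_trig : triggersB.keys.Nodup := by decide

theorem trig_work (u : String) :
    "work" ∈ PySem.Dict.getD triggersB u [] ↔ u ∈ (["work", "office", "calendar", "schedule", "todo", "meeting", "offsite"] : List String) := by
  rw [mem_getD_iff triggersB nodup_trig]
  simp [triggersB, Prod.mk.injEq, or_and_right, exists_or, and_assoc]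
  try tauto

theorem trig_home (u : String) :
    "home" ∈ PySem.Dict.getD triggersB u [] ↔ u ∈ (["home", "sleep", "relax", "curtains", "light", "charge"] : List String) := by
  rw [mem_getD_iff triggersB nodup_trig]
  simp [triggersB, Prod.mk.injEq, or_and_right, exists_or, and_assoc]
  try tauto

theorem trig_commute (u : String) :
    "commute" ∈ PySem.Dict.getD triggersB u [] ↔ u ∈ (["commute", "traffic"] : List String) := by
  rw [mem_getD_iff triggersB nodup_trig]
  simp [triggersB, Prod.mk.injEq, or_and_right, exists_or, and_assoc]
  try tauto

theorem trig_travel (u : String) :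
    "travel" ∈ PySem.Dict.getD triggersB u [] ↔ u ∈ (["travel", "trip", "booking", "drive", "depart", "pickup"] : List String) := by
  rw [mem_getD_iff triggersB nodup_trig]
  simp [triggersB, Prod.mk.injEq, or_and_right, exists_or, and_assoc]
  try tauto

theorem trig_meeting (u : String) :
    "meeting" ∈ PySem.Dict.getD triggersB u [] ↔ u ∈ (["meeting", "calendar"] : List String) := by
  rw [mem_getD_iff triggersB nodup_trig]
  simp [triggersB, Prod.mk.injEq, or_and_right, exists_or, and_assoc]
  try tauto

theorem trig_outdoor (u : String) :
    "outdoor" ∈ PySem.Dict.getD triggersB u [] ↔ u ∈ (["outdoor", "weather", "walking", "nearby", "route", "hydrate"] : List String) := by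
  rw [mem_getD_iff triggersB nodup_trig]
  simp [triggersB, Prod.mk.injEq, or_and_right, exists_or, and_assoc]
  try tauto

theorem trig_exercise (u : String) :
    "exercise" ∈ PySem.Dict.getD triggersB u [] ↔ u ∈ (["activity", "tracking", "workout", "recovery", "walk"] : List String) := by
  rw [mem_getD_iff triggersB nodup_trig]
  simp [triggersB, Prod.mk.injEq, or_and_right, exists_or, and_assoc]
  try tauto

theorem trig_meal_break (u : String) :
    "meal_break" ∈ PySem.Dict.getD triggersB u [] ↔ u ∈ (["meal", "coffee", "payment", "qr"] : List String) := by
  rw [mem_getD_iff triggersB nodup_trig]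
  simp [triggersB, Prod.mk.injEq, or_and_right, exists_or, and_assoc]
  try tauto

theorem trig_night_quiet (u : String) :
    "night_quiet" ∈ PySem.Dict.getD triggersB u [] ↔ u ∈ (["sleep", "dnd", "silent", "comfort", "light"] : List String) := by
  rw [mem_getD_iff triggersB nodup_trig]
  simp [triggersB, Prod.mk.injEq, or_and_right, exists_or, and_assoc]
  try tauto

theorem trig_social_errand (u : String) :
    "social_errand" ∈ PySem.Dict.getD triggersB u [] ↔ u ∈ (["payment", "nearby", "booking", "pickup", "frequent", "social"] : List String) := by
  rw [mem_getD_iff triggersB nodup_trig]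
  simp [triggersB, Prod.mk.injEq, or_and_right, exists_or, and_assoc]
  try tauto

theorem mem_foldl_update (tokens : List String) (s : PySem.Set String) (tag : String) :
    tag ∈ tokens.foldl (fun h t => PySem.Set.update h (PySem.Dict.getD triggersB t [])) s ↔
      tag ∈ s ∨ ∃ t ∈ tokens, tag ∈ PySem.Dict.getD triggersB t [] := by
  induction tokens generalizing s with
  | nil => simp
  | cons x xs ih => simp [List.foldl_cons, ih, PySem.Set.mem_update]; tauto

theorem cond_eq (tokens : List String) (tag : String) (lits : List String)
    (htr : ∀ u : String, tag ∈ PySem.Dict.getD triggersB u [] ↔ u ∈ lits) :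
    pyInterNonempty lits (PySem.Set.ofList tokens) =
      PySem.Set.contains
        (tokens.foldl (fun h t => PySem.Set.update h (PySem.Dict.getD triggersB t [])) PySem.Set.empty) tag := by
  rw [Bool.eq_iff_iff]
  simp only [pyInterNonempty, PySem.Set.inter, PySem.Set.contains, Bool.not_eq_eq_eq_not]
  rw [List.contains_iff_mem, mem_foldl_update]
  simp [PySem.Set.mem_ofList, htr, PySem.Set.empty]
  constructor
  · rintro ⟨w, hw, hwt⟩; exact ⟨w, hwt, hw⟩
  · rintro ⟨t, ht, htl⟩; exact ⟨t, htl, ht⟩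

theorem chain_eq (q : String → Bool) : stageQ q = canonicalB.filter q := by
  simp only [stageQ, canonicalB, List.filter_cons, List.filter_nil]
  generalize q "work" = b1
  generalize q "home" = b2
  generalize q "commute" = b3
  generalize q "travel" = b4
  generalize q "meeting" = b5
  generalize q "outdoor" = b6
  generalize q "exercise" = b7
  generalize q "meal_break" = b8
  generalize q "night_quiet" = b9
  generalize q "social_errand" = b10
  revert b1 b2 b3 b4 b5 b6 b7 b8 b9 b10
  decide

theorem tail_eq (action_id : String) (tokens : List String) (a : List String) :
    tailA action_id tokens a = tailB action_id tokens a := by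
  unfold tailA tailB
  rw [show appMapA = appMapB from rfl,
      show (fun acc a => if acc.contains a then acc else acc ++ [a]) = pyAdd from rfl]
  generalize (if tokens.length == 1 && pyIslower action_id then
      (PySem.Dict.getD appMapB action_id []).foldl pyAdd a else a) = Y
  cases Y <;> simp [pyAdd]

-- ===== VERDICT (by name: the statement is the Claim_ definition above) =====
theorem infer_scene_affinities_py_spec : Claim_equal_infer_scene_affinities_py := by
  intro action_id tokens _
  unfold Spec_infer_scene_affinities_py
  have hA : infer_scene_affinities_py action_id tokens =
      tailA action_id tokens
        (stageQ (fun tag => pyInterNonempty (litsOf tag) (PySem.Set.ofList tokens))) := rfl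
  have hB : infer_scene_affinities_py_alt action_id tokens =
      tailB action_id tokens
        (canonicalB.filter (fun tag => PySem.Set.contains
          (tokens.foldl (fun h t => PySem.Set.update h (PySem.Dict.getD triggersB t []))
            PySem.Set.empty) tag)) := rfl
  rw [hA, hB, chain_eq, ← tail_eq]
  congr 1
  apply List.filter_congr
  intro x hx
  fin_cases hx
  · exact cond_eq tokens "work" _ trig_work
  · exact cond_eq tokens "home" _ trig_home
  · exact cond_eq tokens "commute" _ trig_commute
  · exact cond_eq tokens "travel" _ trig_travel
  · exact cond_eq tokens "meeting" _ trig_meeting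
  · exact cond_eq tokens "outdoor" _ trig_outdoor
  · exact cond_eq tokens "exercise" _ trig_exercise
  · exact cond_eq tokens "meal_break" _ trig_meal_break
  · exact cond_eq tokens "night_quiet" _ trig_night_quiet
  · exact cond_eq tokens "social_errand" _ trig_social_errand
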